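-- pv_equiv track=rewrite | github.com/ken888686/leetcode | main.py | mostChar
-- ===== SOURCE A (Python) =====
-- def mostChar(inputStr):
--     strList = {}
--     maxCount = 0
--     for i in range(len(inputStr)):
--         currentChar = inputStr[i]
--         strList[currentChar] = strList[currentChar] + \
--             1 if currentChar in strList else 1
--         maxCount = max(maxCount, strList[currentChar])
--     return maxCount
-- ===== SOURCE B (Python) =====
-- def mostChar(inputStr):
--     # Build the distinct-character set, then take the max of per-character
--     # counts; default=0 covers the empty string like A's initial maxCount.
--     return max((inputStr.count(c) for c in set(inputStr)), default=0)
-- ===== Notes on version B (the rewrite author's own statement) =====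
-- stated objective: idiomatic
-- what changed: Replaces A's single fused loop maintaining a running dict of counts and a running max by a two-phase expression: the set of distinct characters, then max of str.count per distinct character with default=0 for the empty string.
import Mathlib
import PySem

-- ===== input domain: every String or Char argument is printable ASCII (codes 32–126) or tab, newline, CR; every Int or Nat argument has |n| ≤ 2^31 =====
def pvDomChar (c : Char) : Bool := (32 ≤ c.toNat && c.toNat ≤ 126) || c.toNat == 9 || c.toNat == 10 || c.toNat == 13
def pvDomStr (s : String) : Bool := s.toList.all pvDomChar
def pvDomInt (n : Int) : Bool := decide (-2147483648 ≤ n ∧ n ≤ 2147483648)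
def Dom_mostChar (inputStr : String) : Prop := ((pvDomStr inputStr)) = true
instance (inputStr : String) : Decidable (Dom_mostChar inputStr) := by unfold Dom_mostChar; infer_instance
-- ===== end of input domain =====

-- B replaces A's fused count-and-running-max loop by "max of per-distinct-character counts"
-- (idiomatic two-phase form); same value on every input.

-- ===== PORT A =====
-- the body of A's for-loop: update the dict entry, then the running max
def mostCharStep (st : PySem.Dict Char Int × Int) (currentChar : Char) :
    PySem.Dict Char Int × Int :=
  let n : Int := match st.1.get? currentChar with
    | some v => v + 1        -- 'strList[currentChar] + 1 if currentChar in strList'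
    | none => 1              -- 'else 1'
  (st.1.insert currentChar n, max st.2 n)

def mostChar (inputStr : String) : Int :=
  -- 'for i in range(len(inputStr)): currentChar = inputStr[i]; …' visits the characters in order
  (inputStr.toList.foldl mostCharStep (PySem.Dict.empty, 0)).2

-- ===== PORT B =====
def mostChar_alt (inputStr : String) : Int :=
  let l := inputStr.toList
  match PySem.List.max?
      ((PySem.Set.ofList l).map (fun c => (PySem.List.count l c : Int)))
      (fun y => y) with
  | some v => v
  | none => 0          -- 'default=0'

-- ===== PRECONDITION & SPEC =====
def Spec_mostChar (inputStr : String) (out : Int) : Prop := out = mostChar_alt inputStr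
instance (inputStr : String) (out : Int) : Decidable (Spec_mostChar inputStr out) := by unfold Spec_mostChar; infer_instance

-- ===== CLAIM (what is proved, stated in full; the proofs are below) =====
def Claim_equal_mostChar : Prop := ∀ (inputStr : String), Dom_mostChar inputStr → Spec_mostChar inputStr (mostChar inputStr)

-- ===== LEMMAS AND PROOFS =====

-- A's dict update is an 'insert (getD + 1)'
theorem mostCharStep_eq (st : PySem.Dict Char Int × Int) (c : Char) :
    mostCharStep st c =
      (st.1.insert c (st.1.getD c 0 + 1), max st.2 (st.1.getD c 0 + 1)) := by
  unfold mostCharStep PySem.Dict.getD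
  cases st.1.get? c <;> simp

-- pull a 'max with v' out of a running max fold
theorem foldl_max_init (g : Char → Int) :
    ∀ (t : List Char) (m v : Int),
      t.foldl (fun a x => max a (g x)) (max m v) =
        max v (t.foldl (fun a x => max a (g x)) m) := by
  intro t
  induction t with
  | nil => intro m v; simp [Int.max_comm]
  | cons y t ih =>
      intro m v
      simp only [List.foldl]
      rw [show max (max m v) (g y) = max (max m (g y)) v by omega]
      exact ih (max m (g y)) v

theorem mem_le_foldl_max (g : Char → Int) :
    ∀ (t : List Char) (m : Int) (c : Char), c ∈ t →
      g c ≤ t.foldl (fun a x => max a (g x)) m := by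
  intro t
  induction t with
  | nil => intro m c h; cases h
  | cons y t ih =>
      intro m c h
      simp only [List.foldl]
      rcases List.mem_cons.mp h with rfl | h
      · calc g c ≤ max m (g c) := le_max_right _ _
          _ ≤ _ := (PySem.List.le_foldl_max_int t g _).1
      · exact ih _ c h

theorem foldl_max_le (g : Char → Int) :
    ∀ (t : List Char) (m b : Int), m ≤ b → (∀ x ∈ t, g x ≤ b) →
      t.foldl (fun a x => max a (g x)) m ≤ b := by
  intro t
  induction t with
  | nil => intro m b hm _; exact hm
  | cons y t ih =>
      intro m b hm hx
      simp only [List.foldl]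
      exact ih _ b (max_le hm (hx y (List.mem_cons_self)))
        (fun x h => hx x (List.mem_cons_of_mem _ h))

-- a running max from 0 only depends on which elements occur
theorem foldl_max_congr_mem (g : Char → Int) (u v : List Char)
    (h : ∀ x, x ∈ u ↔ x ∈ v) :
    u.foldl (fun a x => max a (g x)) 0 = v.foldl (fun a x => max a (g x)) 0 := by
  apply le_antisymm
  · exact foldl_max_le g u 0 _ (PySem.List.le_foldl_max_int v g 0).1
      (fun x hx => mem_le_foldl_max g v 0 x ((h x).1 hx))
  · exact foldl_max_le g v 0 _ (PySem.List.le_foldl_max_int u g 0).1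
      (fun x hx => mem_le_foldl_max g u 0 x ((h x).2 hx))

-- the core invariant: A's fused loop, started from any dict d and running max m,
-- computes the running max over 'final count of x = d.getD x 0 + l.count x'
theorem mostChar_loop_eq :
    ∀ (l : List Char) (d : PySem.Dict Char Int) (m : Int),
      (l.foldl mostCharStep (d, m)).2 =
        l.foldl (fun a x => max a (d.getD x 0 + (l.count x : Int))) m := by
  intro l
  induction l with
  | nil => intro d m; rfl
  | cons c t ih =>
      intro d m
      simp only [List.foldl, mostCharStep_eq]
      rw [ih]
      -- the two per-element functions agree pointwise
      have hfun : (fun (a : Int) (x : Char) =>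
            max a ((d.insert c (d.getD c 0 + 1)).getD x 0 + (t.count x : Int))) =
          (fun (a : Int) (x : Char) =>
            max a (d.getD x 0 + (((c :: t).count x : Nat) : Int))) := by
        funext a x
        rw [PySem.Dict.getD_insert]
        by_cases hx : x = c
        · subst hx
          simp only [List.count_cons]
          simp only [beq_self_eq_true, if_true]
          push_cast
          omega
        · have hcx : ¬ (c = x) := fun h => hx h.symm
          simp [hx, hcx]
      rw [hfun]
      -- now only the initial accumulators differ
      set g : Char → Int := fun x => d.getD x 0 + (((c :: t).count x : Nat) : Int) with hgdef
      have hgc : g c = d.getD c 0 + 1 + (t.count c : Int) := by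
        simp [hgdef, List.count_cons]; ring
      by_cases hc : c ∈ t
      · -- both initial maxima are absorbed by the g c element occurring inside t
        have hle : ∀ v : Int, v ≤ g c →
            t.foldl (fun a x => max a (g x)) (max m v) =
              t.foldl (fun a x => max a (g x)) m := by
          intro v hv
          rw [foldl_max_init]
          have := mem_le_foldl_max g t m c hc
          omega
        have h0 : (0:Int) ≤ (t.count c : Int) := Int.natCast_nonneg _
        rw [hle (d.getD c 0 + 1) (by omega), hle (g c) (le_refl _)]
      · have hz : t.count c = 0 := List.count_eq_zero_of_not_mem hc
        rw [show max m (g c) = max m (d.getD c 0 + 1) by rw [hgc, hz]; simp]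

-- B equals the same running max over counts
theorem mostChar_alt_eq (s : String) :
    mostChar_alt s =
      s.toList.foldl (fun a x =>
        max a ((PySem.Dict.empty : PySem.Dict Char Int).getD x 0 + (s.toList.count x : Int))) 0 := by
  unfold mostChar_alt
  have hD : ∀ (x : Char), (PySem.Dict.empty : PySem.Dict Char Int).getD x 0 = 0 := fun _ => rfl
  simp only [hD, zero_add, PySem.List.count_eq]
  set l := s.toList with hl
  cases hdl : PySem.Set.ofList l with
  | nil =>
      have hnil : l = [] := by
        cases hl2 : l with
        | nil => rfl
        | cons a t =>
            have : a ∈ PySem.Set.ofList l := (PySem.Set.mem_ofList l a).2 (by rw [hl2]; exact List.mem_cons_self)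
            rw [hdl] at this; cases this
      rw [hnil]; rfl
  | cons c u =>
      have hmem : ∀ x, x ∈ (c :: u) ↔ x ∈ l := by
        intro x; rw [← hdl, PySem.Set.mem_ofList]
      simp only [List.map_cons, PySem.List.max?_id_cons, List.foldl_map]
      have h0 : max 0 ((l.count c : Int)) = (l.count c : Int) :=
        max_eq_right (Int.natCast_nonneg _)
      calc (u.foldl (fun a x => max a ((l.count x : Int))) ((l.count c : Int)))
          = (c :: u).foldl (fun a x => max a ((l.count x : Int))) 0 := by
            simp only [List.foldl, h0]
        _ = l.foldl (fun a x => max a ((l.count x : Int))) 0 :=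
            foldl_max_congr_mem _ _ _ hmem

-- ===== VERDICT (by name: the statement is the Claim_ definition above) =====
theorem mostChar_spec : Claim_equal_mostChar := by
  intro s _
  unfold Spec_mostChar mostChar
  rw [mostChar_loop_eq, mostChar_alt_eq]
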